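-- pv_equiv track=rewrite | github.com/Roslofe/advent-of-code | day13/reflection.py | reflection_line
-- ===== SOURCE A (Python) =====
-- def reflection_line(pattern):
--     # check if there is a reflection
--     for i in range(len(pattern) - 1, 0, -1):
--         reflected_lines = pattern[i:]
--         reflecting = pattern[:i]
--         reflecting.reverse()
--         pairs = zip(reflected_lines, reflecting)
--         if all(n[0] == n[1] for n in pairs):
--             return i
--     return 0
-- ===== SOURCE B (Python) =====
-- def reflection_line(pattern):
--     n = len(pattern)
--     # round-based sieve: start with every axis as a candidate and, for each pair
--     # index k, keep only the axes whose k-th mirrored row pair matches (axes whose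
--     # mirror is already fully checked stay); the answer is the largest survivor
--     cands = list(range(1, n))
--     for k in range(n // 2):
--         cands = [i for i in cands
--                  if min(i, n - i) <= k or pattern[i + k] == pattern[i - 1 - k]]
--     return max(cands, default=0)
-- ===== Notes on version B (the rewrite author's own statement) =====
-- stated objective: alternative
-- what changed: B transposes the loops into a round-based sieve: it starts with every axis as a candidate and, for each mirrored-pair index k, filters out axes whose k-th pair of rows differs, returning the largest surviving axis, instead of A's descending per-axis slice/reverse/zip test with early return.
import Mathlib
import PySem

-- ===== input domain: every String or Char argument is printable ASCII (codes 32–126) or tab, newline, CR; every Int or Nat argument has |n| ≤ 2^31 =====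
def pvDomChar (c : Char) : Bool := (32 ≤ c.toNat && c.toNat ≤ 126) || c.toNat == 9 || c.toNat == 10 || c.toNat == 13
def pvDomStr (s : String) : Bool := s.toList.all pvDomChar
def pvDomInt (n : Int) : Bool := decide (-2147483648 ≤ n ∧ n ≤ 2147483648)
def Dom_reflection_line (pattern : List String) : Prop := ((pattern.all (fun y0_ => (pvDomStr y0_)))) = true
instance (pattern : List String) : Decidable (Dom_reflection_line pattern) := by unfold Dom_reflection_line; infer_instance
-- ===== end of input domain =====

-- B is an alternative of the same cost: a round-based sieve (filter the candidate
-- axes once per mirrored-pair index, then take the largest survivor) instead of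
-- A's descending per-axis slice/reverse/zip test with early return.

-- ===== PORT A =====
-- the 'for i in range(len(pattern)-1, 0, -1): … return i' loop, as recursion on the range list
def pvGoA (pattern : List String) : List Int → Int
  | [] => 0
  | i :: rest =>
      let reflected_lines := PySem.List.slice pattern (some i) none
      let reflecting := (PySem.List.slice pattern none (some i)).reverse
      let pairs := reflected_lines.zip reflecting
      if pairs.all (fun q => q.1 == q.2) then i else pvGoA pattern rest

def reflection_line (pattern : List String) : Int :=
  pvGoA pattern (PySem.List.pyRange ((pattern.length : Int) - 1) 0 (-1))

-- ===== PORT B =====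
def reflection_line_alt (pattern : List String) : Int :=
  (PySem.List.max?
    ((PySem.List.pyRange 0 (PySem.Int.floordiv (pattern.length : Int) 2) 1).foldl
      (fun cands k => cands.filter
        (fun i => decide (min i ((pattern.length : Int) - i) ≤ k) ||
          (PySem.List.pyGet? pattern (i + k) == PySem.List.pyGet? pattern (i - 1 - k))))
      (PySem.List.pyRange 1 (pattern.length : Int) 1))
    (fun x => x)).getD 0

-- ===== PRECONDITION & SPEC =====
def Spec_reflection_line (pattern : List String) (out : Int) : Prop := out = reflection_line_alt pattern
instance (pattern : List String) (out : Int) : Decidable (Spec_reflection_line pattern out) := by unfold Spec_reflection_line; infer_instance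

-- ===== CLAIM (what is proved, stated in full; the proofs are below) =====
def Claim_equal_reflection_line : Prop := ∀ (pattern : List String), Dom_reflection_line pattern → Spec_reflection_line pattern (reflection_line pattern)

-- ===== LEMMAS AND PROOFS =====

-- A's per-axis check
def pvPA (pattern : List String) (i : Int) : Bool :=
  ((PySem.List.slice pattern (some i) none).zip
      ((PySem.List.slice pattern none (some i)).reverse)).all (fun q => q.1 == q.2)

-- the canonical per-axis check: the min(i, n-i) mirrored row pairs around i match
def pvPB (pattern : List String) (i : Int) : Bool :=
  (PySem.List.pyRange 0 (min i ((pattern.length : Int) - i)) 1).all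
    (fun k => PySem.List.pyGet? pattern (i + k) == PySem.List.pyGet? pattern (i - 1 - k))

-- first hit in a list of candidate axes (result of A's early-return loop)
def pvFirstHit (p : Int → Bool) : List Int → Int
  | [] => 0
  | i :: rest => if p i then i else pvFirstHit p rest

theorem pvGoA_eq_firstHit (pattern : List String) (l : List Int) :
    pvGoA pattern l = pvFirstHit (pvPA pattern) l := by
  induction l with
  | nil => rfl
  | cons i rest ih => simp [pvGoA, pvFirstHit, pvPA, ih]

-- A's loop from the top: first hit on the reverse = last hit = last element of the filter
theorem pvFirstHit_reverse (p : Int → Bool) (l : List Int) :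
    pvFirstHit p l.reverse = ((l.filter p).getLast?).getD 0 := by
  induction l using List.reverseRecOn with
  | nil => rfl
  | append_singleton l x ih =>
      rw [List.reverse_append, List.filter_append]
      simp only [List.reverse_singleton, List.singleton_append, pvFirstHit, List.filter]
      by_cases hx : p x
      · simp [hx]
      · simp [hx, ih]

-- B's round loop: folding filters = one filter by the conjunction of all rounds
theorem pvFoldlFilter (q : Int → Int → Bool) (l : List Int) (cs : List Int) :
    l.foldl (fun cands k => cands.filter (q k)) cs
      = cs.filter (fun i => l.all (fun k => q k i)) := by
  induction l generalizing cs with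
  | nil => simp
  | cons k rest ih =>
      rw [List.foldl_cons, ih, List.filter_filter]
      apply List.filter_congr
      intro i _
      simp [Bool.and_comm]

-- Python's max on a strictly ascending list is its last element
theorem pvMaxSorted (l : List Int) (h : l.Pairwise (· < ·)) :
    PySem.List.max? l (fun x => x) = l.getLast? := by
  induction l with
  | nil => rfl
  | cons x t ih =>
      rw [PySem.List.max?_id_cons]
      clear ih
      induction t generalizing x with
      | nil => rfl
      | cons y t' ih2 =>
          have hxy : x < y := (List.pairwise_cons.mp h).1 y (List.mem_cons_self ..)
          have h' : (y :: t').Pairwise (· < ·) := (List.pairwise_cons.mp h).2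
          rw [List.foldl_cons, max_eq_right hxy.le, ih2 y h']
          simp [List.getLast?_cons_cons]

-- all rounds pass at axis j ⟺ the min(j, n-j) mirrored pairs match
theorem pvRounds_eq_pvPB (pattern : List String) (j : Nat)
    (h1 : 1 ≤ j) (h2 : j < pattern.length) :
    (PySem.List.pyRange 0 (PySem.Int.floordiv (pattern.length : Int) 2) 1).all
      (fun k => decide (min (j : Int) ((pattern.length : Int) - (j : Int)) ≤ k) ||
        (PySem.List.pyGet? pattern ((j : Int) + k) == PySem.List.pyGet? pattern ((j : Int) - 1 - k)))
      = pvPB pattern (j : Int) := by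
  set n := pattern.length with hn
  have hfd : PySem.Int.floordiv (n : Int) 2 = ((n / 2 : Nat) : Int) := by
    exact_mod_cast PySem.Int.floordiv_natCast n 2
  have hm : min ((j : Nat) : Int) ((n : Int) - ((j : Nat) : Int)) = ((min j (n - j) : Nat) : Int) := by
    push_cast; omega
  have hμ : min j (n - j) ≤ n / 2 := by omega
  rw [Bool.eq_iff_iff]
  unfold pvPB
  rw [← hn, hfd, hm, PySem.List.pyRange_one, PySem.List.pyRange_one,
    List.all_map, List.all_map, List.all_eq_true, List.all_eq_true]
  have hH : (((n / 2 : Nat) : Int) - 0).toNat = n / 2 := by omega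
  have hM : (((min j (n - j) : Nat) : Int) - 0).toNat = min j (n - j) := by omega
  rw [hH, hM]
  constructor
  · intro h k hk
    rw [List.mem_range] at hk
    have := h k (by rw [List.mem_range]; omega)
    simp only [Function.comp, Bool.or_eq_true, decide_eq_true_eq] at this
    simp only [Function.comp]
    rcases this with h' | h'
    · exfalso; omega
    · exact h'
  · intro h k hk
    rw [List.mem_range] at hk
    by_cases hle : ((min j (n - j) : Nat) : Int) ≤ (0 : Int) + (k : Int)
    · simp only [Function.comp, Bool.or_eq_true, decide_eq_true_eq]
      exact Or.inl hle
    · have hk' : k < min j (n - j) := by omega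
      have := h k (by rw [List.mem_range]; omega)
      simp only [Function.comp] at this
      simp only [Function.comp, Bool.or_eq_true]
      exact Or.inr this

-- both checks say: the min(i, n-i) mirrored pairs around axis i are equal
theorem pvPA_eq_pvPB (pattern : List String) (j : Nat)
    (h1 : 1 ≤ j) (h2 : j < pattern.length) :
    pvPA pattern (j : Int) = pvPB pattern (j : Int) := by
  rw [Bool.eq_iff_iff]
  set n := pattern.length with hn'
  have hA : pvPA pattern (j : Int) = true ↔
      ∀ (k : Nat) (hk : k < min j (n - j)),
        pattern[j + k]'(by omega) = pattern[j - 1 - k]'(by omega) := by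
    unfold pvPA
    rw [PySem.List.slice_from_natCast, PySem.List.slice_to_natCast, List.all_eq_true]
    constructor
    · intro h k hk
      have hlen : k < ((pattern.drop j).zip ((pattern.take j).reverse)).length := by
        simp [List.length_zip, List.length_reverse, List.length_take, List.length_drop]
        omega
      have := h _ (List.getElem_mem hlen)
      rw [List.getElem_zip] at this
      have hd : (pattern.drop j)[k]'(by simp [List.length_drop]; omega) = pattern[j + k]'(by omega) := by
        rw [List.getElem_drop]
      have ht : ((pattern.take j).reverse)[k]'(by simp [List.length_take]; omega)
          = pattern[j - 1 - k]'(by omega) := by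
        rw [List.getElem_reverse, List.getElem_take]
        congr 1
        simp [List.length_take]
        omega
      simp only [hd, ht] at this
      exact eq_of_beq (by simpa using this)
    · intro h q hq
      obtain ⟨k, hk, rfl⟩ := List.mem_iff_getElem.mp hq
      rw [List.getElem_zip]
      have hk' : k < min j (n - j) := by
        simp [List.length_zip, List.length_reverse, List.length_take, List.length_drop] at hk
        omega
      have hd : (pattern.drop j)[k]'(by simp [List.length_drop]; omega) = pattern[j + k]'(by omega) := by
        rw [List.getElem_drop]
      have ht : ((pattern.take j).reverse)[k]'(by simp [List.length_take]; omega)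
          = pattern[j - 1 - k]'(by omega) := by
        rw [List.getElem_reverse, List.getElem_take]
        congr 1
        simp [List.length_take]
        omega
      simp only [hd, ht]
      simpa using h k hk'
  have hB : pvPB pattern (j : Int) = true ↔
      ∀ (k : Nat) (hk : k < min j (n - j)),
        pattern[j + k]'(by omega) = pattern[j - 1 - k]'(by omega) := by
    unfold pvPB
    have hm : min ((j : Nat) : Int) ((pattern.length : Int) - ((j : Nat) : Int))
        = ((min j (n - j) : Nat) : Int) := by
      rw [← hn']; push_cast; omega
    rw [hm, PySem.List.pyRange_one, List.all_map, List.all_eq_true]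
    have hN : ((((min j (n - j) : Nat) : Int)) - 0).toNat = min j (n - j) := by omega
    rw [hN]
    have helt : ∀ (k : Nat) (hk : k < min j (n - j)),
        ((PySem.List.pyGet? pattern (((j : Nat) : Int) + ((0 : Int) + (k : Int)))
            == PySem.List.pyGet? pattern (((j : Nat) : Int) - 1 - ((0 : Int) + (k : Int)))) = true
          ↔ pattern[j + k]'(by omega) = pattern[j - 1 - k]'(by omega)) := by
      intro k hk
      have hik : (((j : Nat) : Int) + ((0 : Int) + (k : Int))) = ((j + k : Nat) : Int) := by
        omega
      have hik2 : (((j : Nat) : Int) - 1 - ((0 : Int) + (k : Int))) = ((j - 1 - k : Nat) : Int) := by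
        omega
      rw [hik, hik2, PySem.List.pyGet?_natCast, PySem.List.pyGet?_natCast]
      rw [List.getElem?_eq_getElem (by omega), List.getElem?_eq_getElem (by omega)]
      simp
    constructor
    · intro h k hk
      exact (helt k hk).mp (h k (by rw [List.mem_range]; omega))
    · intro h k hk
      rw [List.mem_range] at hk
      exact (helt k hk).mpr (h k hk)
  rw [hA, hB]

-- ===== VERDICT (by name: the statement is the Claim_ definition above) =====
theorem reflection_line_spec : Claim_equal_reflection_line := by
  intro pattern _
  unfold Spec_reflection_line reflection_line reflection_line_alt
  set n := pattern.length with hn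
  -- A side: descending range = reverse of the ascending candidate list
  have hrev : PySem.List.pyRange ((n : Int) - 1) 0 (-1)
      = (PySem.List.pyRange 1 (n : Int) 1).reverse := by
    rw [PySem.List.pyRange_neg_one_eq_reverse]
    norm_num
  rw [pvGoA_eq_firstHit, hrev, pvFirstHit_reverse]
  -- B side: fold of filters = one filter, then max of an ascending list = last
  rw [pvFoldlFilter]
  have hcong : (PySem.List.pyRange 1 (n : Int) 1).filter
      (fun i => (PySem.List.pyRange 0 (PySem.Int.floordiv (n : Int) 2) 1).all
        (fun k => decide (min i ((n : Int) - i) ≤ k) ||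
          (PySem.List.pyGet? pattern (i + k) == PySem.List.pyGet? pattern (i - 1 - k))))
      = (PySem.List.pyRange 1 (n : Int) 1).filter (pvPA pattern) := by
    apply List.filter_congr
    intro i hi
    rw [PySem.List.mem_pyRange_one] at hi
    obtain ⟨j, rfl⟩ : ∃ j : Nat, i = (j : Int) := ⟨i.toNat, by omega⟩
    have h1 : 1 ≤ j := by omega
    have h2 : j < n := by omega
    rw [pvRounds_eq_pvPB pattern j h1 h2, pvPA_eq_pvPB pattern j h1 h2]
  rw [hcong, pvMaxSorted]
  exact (PySem.List.pairwise_lt_pyRange_one 1 (n : Int)).filter _
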